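-- pv_equiv track=rewrite | github.com/prefeiturasp/SME-PTRF-BackEnd | sme_ptrf_apps/core/services/membro_associacao_service.py | seleciona_cargo_servidor
-- ===== SOURCE A (Python) =====
-- def seleciona_cargo_servidor(result_info_servidor):
--     """
--     Escolhe na lista de funções de um servidor apenas uma conforme regras de priorização de cargo
--     """
--
--     # Se hpuve apenas um registro, retorna o próprio
--     if len(result_info_servidor) <= 1:
--         return result_info_servidor
--
--     # Procura pelo cargo de diretor
--     result = next((info for info in result_info_servidor if "DIRETOR" in info["cargo"]), None)
--
--     if not result:
--         # Procura pelo cargo de coordenador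
--         result = next((info for info in result_info_servidor if "COORDENADOR" in info["cargo"]), None)
--
--     if not result:
--         # Procura pelo cargo de assistente
--         result = next((info for info in result_info_servidor if "ASSISTENTE" in info["cargo"]), None)
--
--     if not result:
--         # Retorna o primeiro
--         result = result_info_servidor[0]
--
--     return [result]
-- ===== SOURCE B (Python) =====
-- def seleciona_cargo_servidor(result_info_servidor):
--     """
--     Escolhe na lista de funções de um servidor apenas uma conforme regras de priorização de cargo
--     """
--     # Se houve apenas um registro, retorna o próprio
--     if len(result_info_servidor) <= 1:
--         return result_info_servidor
--
--     def rank(info):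
--         cargo = info["cargo"]
--         if "DIRETOR" in cargo:
--             return 0
--         if "COORDENADOR" in cargo:
--             return 1
--         if "ASSISTENTE" in cargo:
--             return 2
--         return 3
--
--     best = result_info_servidor[0]
--     best_rank = rank(best)
--     for info in result_info_servidor[1:]:
--         r = rank(info)
--         if r < best_rank:
--             best, best_rank = info, r
--     return [best]
-- ===== Notes on version B (the rewrite author's own statement) =====
-- stated objective: simpler
-- what changed: Replaces the three sequential next() scans over the list with a single pass that tracks the record of minimum cargo rank (DIRETOR=0, COORDENADOR=1, ASSISTENTE=2, else 3) using a strict-less-than update, preserving first-occurrence-per-priority semantics.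
-- outside the precondition, e.g. on seleciona_cargo_servidor([{'cargo': 'DIRETOR'}, {}]): A returns [{'cargo': 'DIRETOR'}], B raises KeyError
import Mathlib
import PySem

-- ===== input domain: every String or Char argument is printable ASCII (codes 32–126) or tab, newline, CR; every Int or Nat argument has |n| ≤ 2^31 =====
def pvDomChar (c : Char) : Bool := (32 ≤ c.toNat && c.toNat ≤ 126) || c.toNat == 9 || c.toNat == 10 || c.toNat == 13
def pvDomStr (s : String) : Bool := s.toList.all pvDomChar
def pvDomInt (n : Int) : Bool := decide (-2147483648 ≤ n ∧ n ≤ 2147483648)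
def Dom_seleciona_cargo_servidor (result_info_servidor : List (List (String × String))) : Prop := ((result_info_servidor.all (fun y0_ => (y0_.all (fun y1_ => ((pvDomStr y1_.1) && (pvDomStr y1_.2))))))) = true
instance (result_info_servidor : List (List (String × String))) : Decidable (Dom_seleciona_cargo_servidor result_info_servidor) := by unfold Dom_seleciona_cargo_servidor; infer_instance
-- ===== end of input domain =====

-- B replaces A's three sequential next() scans by one pass tracking the record of minimum
-- cargo rank (strict-less-than update keeps the earliest record of the best rank): simpler.

-- ===== PORT A =====
-- info["cargo"] (assoc-list lookup, first match); Pre_ guarantees the key is present, so getD "" is never the raising case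
def pvCargo (info : List (String × String)) : String :=
  ((info.find? (fun kv => kv.1 == "cargo")).map Prod.snd).getD ""

def pvP0 (info : List (String × String)) : Bool := PySem.Str.isIn "DIRETOR" (pvCargo info)
def pvP1 (info : List (String × String)) : Bool := PySem.Str.isIn "COORDENADOR" (pvCargo info)
def pvP2 (info : List (String × String)) : Bool := PySem.Str.isIn "ASSISTENTE" (pvCargo info)

def seleciona_cargo_servidor (result_info_servidor : List (List (String × String))) : List (List (String × String)) :=
  if result_info_servidor.length ≤ 1 then result_info_servidor
  else
    let r0 := result_info_servidor.find? pvP0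
    let r1 := match r0 with | some x => some x | none => result_info_servidor.find? pvP1
    let r2 := match r1 with | some x => some x | none => result_info_servidor.find? pvP2
    match r2 with
    | some x => [x]
    | none => [result_info_servidor.headD []]  -- result_info_servidor[0]; list nonempty in this branch

-- ===== PORT B =====
def pvRank (info : List (String × String)) : Nat :=
  if pvP0 info then 0 else if pvP1 info then 1 else if pvP2 info then 2 else 3

def pvLoop : List (List (String × String)) → List (String × String) → Nat → List (String × String)
  | [], best, _ => best
  | x :: t, best, bestRank =>
      if pvRank x < bestRank then pvLoop t x (pvRank x) else pvLoop t best bestRank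

def seleciona_cargo_servidor_alt (result_info_servidor : List (List (String × String))) : List (List (String × String)) :=
  if result_info_servidor.length ≤ 1 then result_info_servidor
  else
    match result_info_servidor with
    | [] => []
    | h :: t => [pvLoop t h (pvRank h)]

-- ===== PRECONDITION & SPEC =====
-- Pre_ excludes inputs of length ≥ 2 where some record lacks the "cargo" key: there Python A
-- either raises KeyError or (if an earlier record already matched) returns while B raises KeyError.
def Pre_seleciona_cargo_servidor (result_info_servidor : List (List (String × String))) : Prop :=
  result_info_servidor.length ≤ 1 ∨
    ∀ info ∈ result_info_servidor, (info.any (fun kv => kv.1 == "cargo")) = true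
instance (result_info_servidor : List (List (String × String))) : Decidable (Pre_seleciona_cargo_servidor result_info_servidor) := by unfold Pre_seleciona_cargo_servidor; infer_instance

def pvWitness_seleciona_cargo_servidor : (List (List (String × String))) :=
  [[("cargo", "PROFESSOR")], [("cargo", "COORDENADOR GERAL")], [("cargo", "DIRETOR")]]

def Spec_seleciona_cargo_servidor (result_info_servidor : List (List (String × String))) (out : List (List (String × String))) : Prop := out = seleciona_cargo_servidor_alt result_info_servidor
instance (result_info_servidor : List (List (String × String))) (out : List (List (String × String))) : Decidable (Spec_seleciona_cargo_servidor result_info_servidor out) := by unfold Spec_seleciona_cargo_servidor; infer_instance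

-- ===== CLAIM (what is proved, stated in full; the proofs are below) =====
def Claim_equal_seleciona_cargo_servidor : Prop := ∀ (result_info_servidor : List (List (String × String))), Dom_seleciona_cargo_servidor result_info_servidor → Pre_seleciona_cargo_servidor result_info_servidor → Spec_seleciona_cargo_servidor result_info_servidor (seleciona_cargo_servidor result_info_servidor)

-- ===== LEMMAS AND PROOFS =====

-- A's three-find chain on a nonempty list, as one proof-side function
def pvChain (xs : List (List (String × String))) (dflt : List (String × String)) : List (String × String) :=
  match xs.find? pvP0 with
  | some x => x
  | none => match xs.find? pvP1 with
    | some x => x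
    | none => match xs.find? pvP2 with
      | some x => x
      | none => dflt

lemma pvChain_merge (h x : List (String × String)) (t : List (List (String × String))) :
    pvChain ((if pvRank x < pvRank h then x else h) :: t) (if pvRank x < pvRank h then x else h)
      = pvChain (h :: x :: t) h := by
  cases h0 : pvP0 h <;> cases h1 : pvP1 h <;> cases h2 : pvP2 h <;>
  cases g0 : pvP0 x <;> cases g1 : pvP1 x <;> cases g2 : pvP2 x <;>
    simp [pvChain, pvRank, h0, h1, h2, g0, g1, g2]

lemma pvLoop_eq_chain : ∀ (t : List (List (String × String))) (h : List (String × String)),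
    pvLoop t h (pvRank h) = pvChain (h :: t) h := by
  intro t
  induction t with
  | nil =>
      intro h
      cases h0 : pvP0 h <;> cases h1 : pvP1 h <;> cases h2 : pvP2 h <;>
        simp [pvLoop, pvChain, h0, h1, h2]
  | cons x t ih =>
      intro h
      by_cases hc : pvRank x < pvRank h
      · simp only [pvLoop, if_pos hc, ih]
        rw [← pvChain_merge h x t, if_pos hc]
      · simp only [pvLoop, if_neg hc, ih]
        rw [← pvChain_merge h x t, if_neg hc]

lemma seleciona_eq_chain (h x : List (String × String)) (t : List (List (String × String))) :
    seleciona_cargo_servidor (h :: x :: t) = [pvChain (h :: x :: t) h] := by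
  simp only [seleciona_cargo_servidor, pvChain, List.length_cons]
  rw [if_neg (by simp)]
  cases (h :: x :: t).find? pvP0 <;> cases (h :: x :: t).find? pvP1 <;>
    cases (h :: x :: t).find? pvP2 <;> rfl

-- ===== VERDICT (by name: the statement is the Claim_ definition above) =====
theorem seleciona_cargo_servidor_spec : Claim_equal_seleciona_cargo_servidor := by
  intro l _dom _pre
  unfold Spec_seleciona_cargo_servidor
  match l with
  | [] => rfl
  | [h] => rfl
  | h :: x :: t =>
      rw [seleciona_eq_chain h x t]
      simp only [seleciona_cargo_servidor_alt, List.length_cons]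
      rw [if_neg (by simp), pvLoop_eq_chain]
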